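-- pv_equiv track=rewrite | github.com/eamoe/python-course | homework-seminar4-task3.py | create_stats_dictionary
-- ===== SOURCE A (Python) =====
-- def create_stats_dictionary(scores):
--     stats_dictionary = {}
--     for element in scores:
--         team_name = element[0]
--         if team_name in stats_dictionary:
--             stats_dictionary[team_name][0] = int(stats_dictionary[team_name][0]) + int(element[1])
--             stats_dictionary[team_name][1] = int(stats_dictionary[team_name][1]) + int(element[2])
--             stats_dictionary[team_name][2] = int(stats_dictionary[team_name][2]) + int(element[3])
--             stats_dictionary[team_name][3] = int(stats_dictionary[team_name][3]) + int(element[4])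
--             stats_dictionary[team_name][4] = int(stats_dictionary[team_name][4]) + int(element[5])
--         else:
--             stats_dictionary[team_name] = [int(element[1]), int(element[2]), int(element[3]), int(element[4]), int(element[5])]
--
--     return stats_dictionary
-- ===== SOURCE B (Python) =====
-- def create_stats_dictionary(scores):
--     groups = {}
--     for row in scores:
--         groups.setdefault(row[0], []).append(row)
--     return {team: [sum(int(r[i]) for r in rows) for i in range(1, 6)]
--             for team, rows in groups.items()}
-- ===== Notes on version B (the rewrite author's own statement) =====
-- stated objective: alternative
-- what changed: B first groups the rows by team into an insertion-ordered dict of row lists, then in a second phase computes each team's five stats by summing each column over its group, instead of A's single pass that branches per row and mutates a running five-element accumulator in the dict.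
import Mathlib
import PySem

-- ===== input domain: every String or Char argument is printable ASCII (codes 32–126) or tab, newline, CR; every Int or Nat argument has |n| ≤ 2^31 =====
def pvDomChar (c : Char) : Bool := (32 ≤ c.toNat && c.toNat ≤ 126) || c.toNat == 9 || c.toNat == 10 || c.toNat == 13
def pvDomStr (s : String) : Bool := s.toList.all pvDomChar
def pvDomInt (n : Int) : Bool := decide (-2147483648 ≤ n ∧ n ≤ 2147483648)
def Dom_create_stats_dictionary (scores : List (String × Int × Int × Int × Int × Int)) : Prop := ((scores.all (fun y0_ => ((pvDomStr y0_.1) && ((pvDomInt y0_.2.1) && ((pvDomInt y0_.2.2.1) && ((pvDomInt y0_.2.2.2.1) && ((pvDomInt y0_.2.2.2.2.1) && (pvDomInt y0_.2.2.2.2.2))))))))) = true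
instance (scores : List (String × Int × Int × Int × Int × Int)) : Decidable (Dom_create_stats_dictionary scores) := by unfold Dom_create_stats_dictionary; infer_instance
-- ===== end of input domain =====

-- B groups the rows per team first and sums each column in a second phase, instead of
-- A's per-row branch-and-accumulate pass; same cost, different decomposition.

-- ===== PORT A =====
-- the stored list always has length 5, so List.getD i 0 / List.set model Python's
-- in-place v[i] read / v[i] = … exactly here (each assignment sees the previous one)
def pvUpdA (v : List Int) (e : String × Int × Int × Int × Int × Int) : List Int :=
  let v := v.set 0 (v.getD 0 0 + e.2.1)
  let v := v.set 1 (v.getD 1 0 + e.2.2.1)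
  let v := v.set 2 (v.getD 2 0 + e.2.2.2.1)
  let v := v.set 3 (v.getD 3 0 + e.2.2.2.2.1)
  v.set 4 (v.getD 4 0 + e.2.2.2.2.2)

def pvStepA (d : PySem.Dict String (List Int)) (e : String × Int × Int × Int × Int × Int) :
    PySem.Dict String (List Int) :=
  let team := e.1
  if d.contains team then
    d.insert team (pvUpdA (d.getD team []) e)
  else
    d.insert team [e.2.1, e.2.2.1, e.2.2.2.1, e.2.2.2.2.1, e.2.2.2.2.2]

def create_stats_dictionary (scores : List (String × Int × Int × Int × Int × Int)) : List (String × List Int) :=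
  (scores.foldl pvStepA PySem.Dict.empty).items

-- ===== PORT B =====
-- tuple indexing r[i]; only i = 1..5 is ever used by pvStatRow
def pvColGet (r : String × Int × Int × Int × Int × Int) (i : Int) : Int :=
  if i = 1 then r.2.1 else if i = 2 then r.2.2.1 else if i = 3 then r.2.2.2.1
  else if i = 4 then r.2.2.2.2.1 else if i = 5 then r.2.2.2.2.2 else 0

def pvStatRow (rows : List (String × Int × Int × Int × Int × Int)) : List Int :=
  (PySem.List.pyRange 1 6 1).map (fun i => (rows.map (fun r => pvColGet r i)).sum)

def create_stats_dictionary_alt (scores : List (String × Int × Int × Int × Int × Int)) : List (String × List Int) :=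
  let groups := scores.foldl (fun g row => g.modify row.1 [] (fun rs => rs ++ [row])) PySem.Dict.empty
  groups.items.map (fun p => (p.1, pvStatRow p.2))

-- ===== PRECONDITION & SPEC =====
def Spec_create_stats_dictionary (scores : List (String × Int × Int × Int × Int × Int)) (out : List (String × List Int)) : Prop := out = create_stats_dictionary_alt scores
instance (scores : List (String × Int × Int × Int × Int × Int)) (out : List (String × List Int)) : Decidable (Spec_create_stats_dictionary scores out) := by unfold Spec_create_stats_dictionary; infer_instance

-- ===== CLAIM (what is proved, stated in full; the proofs are below) =====
def Claim_equal_create_stats_dictionary : Prop := ∀ (scores : List (String × Int × Int × Int × Int × Int)), Dom_create_stats_dictionary scores → Spec_create_stats_dictionary scores (create_stats_dictionary scores)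

-- ===== LEMMAS AND PROOFS =====

-- column sums of a list of rows
def pvSums (rows : List (String × Int × Int × Int × Int × Int)) : List Int :=
  [(rows.map (·.2.1)).sum, (rows.map (·.2.2.1)).sum, (rows.map (·.2.2.2.1)).sum,
   (rows.map (·.2.2.2.2.1)).sum, (rows.map (·.2.2.2.2.2)).sum]

theorem pvUpdA_five (a b c d e : Int) (r : String × Int × Int × Int × Int × Int) :
    pvUpdA [a, b, c, d, e] r =
      [a + r.2.1, b + r.2.2.1, c + r.2.2.2.1, d + r.2.2.2.2.1, e + r.2.2.2.2.2] := by
  rfl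

theorem pvFoldUpdA (rows : List (String × Int × Int × Int × Int × Int)) :
    ∀ a b c d e : Int,
      rows.foldl pvUpdA [a, b, c, d, e] =
        [a + (rows.map (·.2.1)).sum, b + (rows.map (·.2.2.1)).sum,
         c + (rows.map (·.2.2.2.1)).sum, d + (rows.map (·.2.2.2.2.1)).sum,
         e + (rows.map (·.2.2.2.2.2)).sum] := by
  induction rows with
  | nil => intro a b c d e; simp
  | cons r rest ih =>
    intro a b c d e
    simp only [List.foldl_cons, pvUpdA_five, ih, List.map_cons, List.sum_cons]
    ring_nf

theorem pvStepA_eq_insert :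
    pvStepA = fun d e => d.insert e.1
      (if d.contains e.1 then pvUpdA (d.getD e.1 []) e
       else [e.2.1, e.2.2.1, e.2.2.2.1, e.2.2.2.2.1, e.2.2.2.2.2]) := by
  funext d e
  simp only [pvStepA]
  split <;> simp_all

theorem pvLoopA_getD (l : List (String × Int × Int × Int × Int × Int)) :
    ∀ (d : PySem.Dict String (List Int)) (k : String),
      (l.foldl pvStepA d).getD k [] =
        if d.contains k then (l.filter (fun r => r.1 == k)).foldl pvUpdA (d.getD k [])
        else match l.filter (fun r => r.1 == k) with
          | [] => d.getD k []
          | e :: rest => rest.foldl pvUpdA [e.2.1, e.2.2.1, e.2.2.2.1, e.2.2.2.2.1, e.2.2.2.2.2] := by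
  induction l with
  | nil => intro d k; simp
  | cons r l ih =>
    intro d k
    rw [List.foldl_cons, ih]
    by_cases hk : r.1 = k
    · subst hk
      by_cases hc : d.contains r.1
      · simp [pvStepA, hc]
      · simp [pvStepA, hc]
    · have hbeq : (r.1 == k) = false := by simp [hk]
      by_cases hc : d.contains r.1
      · simp [pvStepA, hc, PySem.Dict.contains_insert, PySem.Dict.getD_insert, hbeq,
              Ne.symm hk]
      · simp [pvStepA, hc, PySem.Dict.contains_insert, PySem.Dict.getD_insert, hbeq,
              Ne.symm hk]

theorem pvA_getD (scores : List (String × Int × Int × Int × Int × Int)) (k : String)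
    (hk : k ∈ scores.map (·.1)) :
    (scores.foldl pvStepA PySem.Dict.empty).getD k [] =
      pvSums (scores.filter (fun r => r.1 == k)) := by
  rw [pvLoopA_getD]
  simp only [PySem.Dict.contains_empty, if_false, Bool.false_eq_true]
  have hne : scores.filter (fun r => r.1 == k) ≠ [] := by
    rcases List.mem_map.mp hk with ⟨r, hr, hrk⟩
    intro h
    have : r ∈ scores.filter (fun r => r.1 == k) := by
      simp [List.mem_filter, hr, hrk]
    simp [h] at this
  cases hfil : scores.filter (fun r => r.1 == k) with
  | nil => exact absurd hfil hne
  | cons e rest =>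
    simp only [pvFoldUpdA, pvSums, List.map_cons, List.sum_cons]

theorem pvA_keys (scores : List (String × Int × Int × Int × Int × Int)) :
    (scores.foldl pvStepA PySem.Dict.empty).keys = PySem.Set.ofList (scores.map (·.1)) := by
  rw [pvStepA_eq_insert, PySem.Dict.keys_foldl_insert_key, PySem.Dict.keys_empty,
      PySem.Set.update_nil_left]

theorem pvA_nodup (scores : List (String × Int × Int × Int × Int × Int)) :
    (scores.foldl pvStepA PySem.Dict.empty).keys.Nodup := by
  rw [pvStepA_eq_insert]
  exact PySem.Dict.nodup_keys_foldl_insert_key scores (·.1) _ _ (by simp [PySem.Dict.keys_empty])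

-- B's grouping loop
theorem pvB_groups_eq (scores : List (String × Int × Int × Int × Int × Int)) :
    scores.foldl (fun g row => g.modify row.1 [] (fun rs => rs ++ [row])) PySem.Dict.empty =
      (scores.map (fun r => (r.1, r))).foldl
        (fun d p => d.modify p.1 [] (fun rs => rs ++ [p.2])) PySem.Dict.empty := by
  rw [List.foldl_map]

theorem pvB_getD (scores : List (String × Int × Int × Int × Int × Int)) (k : String) :
    (scores.foldl (fun g row => g.modify row.1 [] (fun rs => rs ++ [row])) PySem.Dict.empty).getD k []
      = scores.filter (fun r => r.1 == k) := by
  rw [pvB_groups_eq, PySem.Dict.getD_foldl_modify_append]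
  simp [List.filter_map, Function.comp_def]

theorem pvB_keys (scores : List (String × Int × Int × Int × Int × Int)) :
    (scores.foldl (fun g row => g.modify row.1 [] (fun rs => rs ++ [row])) PySem.Dict.empty).keys
      = PySem.Set.ofList (scores.map (·.1)) := by
  rw [PySem.Dict.keys_foldl_modify_key, PySem.Dict.keys_empty, PySem.Set.update_nil_left]

theorem pvB_nodup (scores : List (String × Int × Int × Int × Int × Int)) :
    (scores.foldl (fun g row => g.modify row.1 [] (fun rs => rs ++ [row])) PySem.Dict.empty).keys.Nodup := by
  exact PySem.Dict.nodup_keys_foldl_modify_key scores (·.1) _ _ _ (by simp [PySem.Dict.keys_empty])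

theorem pvStatRow_eq_sums (rows : List (String × Int × Int × Int × Int × Int)) :
    pvStatRow rows = pvSums rows := by
  have hrange : PySem.List.pyRange 1 6 1 = [1, 2, 3, 4, 5] := by decide
  simp [pvStatRow, hrange, pvColGet, pvSums]

-- ===== VERDICT (by name: the statement is the Claim_ definition above) =====
theorem create_stats_dictionary_spec : Claim_equal_create_stats_dictionary := by
  intro scores _
  show create_stats_dictionary scores = create_stats_dictionary_alt scores
  unfold create_stats_dictionary create_stats_dictionary_alt
  show (scores.foldl pvStepA PySem.Dict.empty).items =
    ((scores.foldl (fun g row => g.modify row.1 [] (fun rs => rs ++ [row])) PySem.Dict.empty).items).map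
      (fun p => (p.1, pvStatRow p.2))
  rw [PySem.Dict.items_eq_map_keys _ (pvA_nodup scores) ([] : List Int),
      PySem.Dict.items_eq_map_keys _ (pvB_nodup scores) ([] : List (String × Int × Int × Int × Int × Int)),
      pvA_keys, pvB_keys, List.map_map]
  apply List.map_congr_left
  intro k hk
  have hk' : k ∈ scores.map (·.1) := (PySem.Set.mem_ofList _ _).mp hk
  simp only [Function.comp]
  rw [pvA_getD scores k hk', pvB_getD scores k, pvStatRow_eq_sums]
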